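-- pv_equiv track=rewrite | github.com/projeto-de-algoritmos-2026/Grafos_GrafoGuiaGrade | src/interface.py | buscar_todos_pre_requisitos
-- ===== SOURCE A (Python) =====
-- def buscar_todos_pre_requisitos(materia_alvo, grafo, visitados=None):
--     if visitados is None:
--         visitados = set()
--     pre_requisitos_encontrados = set()
--     for disciplina, sucessores in grafo.items():
--         if materia_alvo in sucessores:
--             pre_requisitos_encontrados.add(disciplina)
--             if disciplina not in visitados:
--                 visitados.add(disciplina)
--                 ancestrais = buscar_todos_pre_requisitos(disciplina, grafo, visitados)
--                 pre_requisitos_encontrados.update(ancestrais)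
--     return pre_requisitos_encontrados
-- ===== SOURCE B (Python) =====
-- def buscar_todos_pre_requisitos(materia_alvo, grafo, visitados=None):
--     if visitados is None:
--         visitados = set()
--     # Stage 1: build the reverse-adjacency (predecessor) index once.
--     predecessores = {}
--     for disciplina, sucessores in grafo.items():
--         for sucessor in sucessores:
--             predecessores.setdefault(sucessor, []).append(disciplina)
--     # Stage 2: emit the raw discovery trail of one DFS over predecessor lists
--     # (a node may be emitted several times), then dedup at the end.
--     trilha = []
--     def emitir(alvo):
--         for disciplina in predecessores.get(alvo, []):
--             trilha.append(disciplina)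
--             if disciplina not in visitados:
--                 visitados.add(disciplina)
--                 emitir(disciplina)
--     emitir(materia_alvo)
--     return set(trilha)
-- ===== Notes on version B (the rewrite author's own statement) =====
-- stated objective: alternative
-- what changed: B builds a reverse-adjacency (predecessor) index in one pass and then runs a single DFS that only emits a raw discovery trail, deduplicating once at the end, instead of A's rescan of every key's successor list at each recursive call with a result set maintained throughout.
import Mathlib
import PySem

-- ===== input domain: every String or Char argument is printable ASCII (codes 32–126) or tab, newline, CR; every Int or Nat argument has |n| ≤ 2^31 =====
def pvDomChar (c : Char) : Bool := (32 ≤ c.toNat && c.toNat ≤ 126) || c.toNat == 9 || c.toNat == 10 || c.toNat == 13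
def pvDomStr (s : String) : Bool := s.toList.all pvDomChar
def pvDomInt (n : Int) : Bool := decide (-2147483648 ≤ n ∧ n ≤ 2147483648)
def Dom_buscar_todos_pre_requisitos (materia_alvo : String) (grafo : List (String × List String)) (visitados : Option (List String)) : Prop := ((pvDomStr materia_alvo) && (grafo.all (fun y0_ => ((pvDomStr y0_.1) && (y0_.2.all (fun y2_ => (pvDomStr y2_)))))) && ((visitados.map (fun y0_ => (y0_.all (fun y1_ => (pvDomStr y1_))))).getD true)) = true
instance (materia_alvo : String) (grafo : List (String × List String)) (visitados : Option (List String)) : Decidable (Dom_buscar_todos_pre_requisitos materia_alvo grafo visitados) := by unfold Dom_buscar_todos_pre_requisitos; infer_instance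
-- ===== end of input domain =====

-- B first builds a reverse-adjacency (predecessor) index, then emits the raw discovery trail of one
-- DFS over predecessor lists and dedups it once at the end, instead of A's full rescan of the graph
-- at every recursive call with a result set maintained during the traversal (objective: alternative).
-- A mutates the caller's `visitados` set; B performs the very same mutation (same elements added),
-- and the equivalence proved here is about the return value.

-- ===== PORT A =====
-- The recursion carries the mutated `visitados` set through (Python shares one set object);
-- `fuel` only makes the recursion total: the nesting depth is bounded by the number of keys,
-- since each nested call first adds a fresh key to `visitados` (fuel = items.length suffices).
def pvAgo (fuel : Nat) (items : List (String × List String)) (alvo : String)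
    (pending : List (String × List String)) (vis res : List String) :
    List String × List String :=
  match pending with
  | [] => (res, vis)
  | (d, succ) :: rest =>
    if succ.contains alvo then
      let res1 := PySem.Set.add res d
      if vis.contains d then
        pvAgo fuel items alvo rest vis res1
      else
        match fuel with
        | 0 => pvAgo 0 items alvo rest (PySem.Set.add vis d) res1   -- unreachable: fuel ≥ remaining depth
        | fuel' + 1 =>
          let r := pvAgo fuel' items d items (PySem.Set.add vis d) []
          pvAgo (fuel' + 1) items alvo rest r.2 (PySem.Set.update res1 r.1)
    else
      pvAgo fuel items alvo rest vis res
termination_by (fuel, pending.length)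

def buscar_todos_pre_requisitos (materia_alvo : String) (grafo : List (String × List String)) (visitados : Option (List String)) : List String :=
  let vis0 := PySem.Set.ofList (visitados.getD [])
  let items := (PySem.Dict.ofList grafo).items
  (pvAgo items.length items materia_alvo items vis0 []).1

-- ===== PORT B =====
-- Stage 1: reverse-adjacency index, predecessores[s] = disciplinas having s among their successors
def pvBuildPreds (items : List (String × List String)) : PySem.Dict String (List String) :=
  items.foldl (fun dd p => p.2.foldl (fun dd s => dd.modify s [] (· ++ [p.1])) dd) PySem.Dict.empty

-- Stage 2: `emitir` — appends every discovered predecessor to the trail (duplicates included)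
-- and recurses into the ones not yet visited; returns (trail emitted, final visitados).
-- `fuel` only makes the recursion total (depth ≤ number of keys, as each level adds a fresh one).
def pvEmit (fuel : Nat) (preds : PySem.Dict String (List String))
    (pending vis : List String) : List String × List String :=
  match pending with
  | [] => ([], vis)
  | d :: rest =>
    if vis.contains d then
      let r := pvEmit fuel preds rest vis
      (d :: r.1, r.2)
    else
      match fuel with
      | 0 =>      -- unreachable: fuel ≥ remaining depth
        let r := pvEmit 0 preds rest (PySem.Set.add vis d)
        (d :: r.1, r.2)
      | fuel' + 1 =>
        let c := pvEmit fuel' preds (preds.getD d []) (PySem.Set.add vis d)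
        let r := pvEmit (fuel' + 1) preds rest c.2
        (d :: (c.1 ++ r.1), r.2)
termination_by (fuel, pending.length)

def buscar_todos_pre_requisitos_alt (materia_alvo : String) (grafo : List (String × List String)) (visitados : Option (List String)) : List String :=
  let vis0 := PySem.Set.ofList (visitados.getD [])
  let items := (PySem.Dict.ofList grafo).items
  let preds := pvBuildPreds items
  let trilha := (pvEmit items.length preds (preds.getD materia_alvo []) vis0).1
  PySem.Set.ofList trilha

-- ===== PRECONDITION & SPEC =====
def Spec_buscar_todos_pre_requisitos (materia_alvo : String) (grafo : List (String × List String)) (visitados : Option (List String)) (out : List String) : Prop := out = buscar_todos_pre_requisitos_alt materia_alvo grafo visitados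
instance (materia_alvo : String) (grafo : List (String × List String)) (visitados : Option (List String)) (out : List String) : Decidable (Spec_buscar_todos_pre_requisitos materia_alvo grafo visitados out) := by unfold Spec_buscar_todos_pre_requisitos; infer_instance

-- ===== CLAIM (what is proved, stated in full; the proofs are below) =====
def Claim_equal_buscar_todos_pre_requisitos : Prop := ∀ (materia_alvo : String) (grafo : List (String × List String)) (visitados : Option (List String)), Dom_buscar_todos_pre_requisitos materia_alvo grafo visitados → Spec_buscar_todos_pre_requisitos materia_alvo grafo visitados (buscar_todos_pre_requisitos materia_alvo grafo visitados)

-- ===== LEMMAS AND PROOFS =====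

-- A's candidate sequence at target `c`: each key d once per occurrence of c in its successor list
-- (A tests membership once per key; B's trail sees every copy, the extra copies dedup away).
def pvFlat (c : String) (pending : List (String × List String)) : List String :=
  pending.flatMap (fun p => List.replicate (p.2.count c) p.1)

-- one-step unfolding lemmas for the two loops
theorem pvEmit_cons_mem (fuel : Nat) (preds : PySem.Dict String (List String)) (d : String)
    (rest vis : List String) (hv : vis.contains d = true) :
    pvEmit fuel preds (d :: rest) vis
      = (d :: (pvEmit fuel preds rest vis).1, (pvEmit fuel preds rest vis).2) := by
  conv_lhs => rw [pvEmit.eq_def]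
  simp only [hv, if_true]

theorem pvEmit_cons_notmem_zero (preds : PySem.Dict String (List String)) (d : String)
    (rest vis : List String) (hv : vis.contains d = false) :
    pvEmit 0 preds (d :: rest) vis
      = (d :: (pvEmit 0 preds rest (PySem.Set.add vis d)).1,
         (pvEmit 0 preds rest (PySem.Set.add vis d)).2) := by
  conv_lhs => rw [pvEmit.eq_def]
  simp only [hv, Bool.false_eq_true, if_false]

theorem pvEmit_cons_notmem_succ (fuel' : Nat) (preds : PySem.Dict String (List String)) (d : String)
    (rest vis : List String) (hv : vis.contains d = false) :
    pvEmit (fuel' + 1) preds (d :: rest) vis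
      = (d :: ((pvEmit fuel' preds (preds.getD d []) (PySem.Set.add vis d)).1
              ++ (pvEmit (fuel' + 1) preds rest
                    (pvEmit fuel' preds (preds.getD d []) (PySem.Set.add vis d)).2).1),
         (pvEmit (fuel' + 1) preds rest
            (pvEmit fuel' preds (preds.getD d []) (PySem.Set.add vis d)).2).2) := by
  conv_lhs => rw [pvEmit.eq_def]
  simp only [hv, Bool.false_eq_true, if_false]

theorem pvAgo_cons_skip (fuel : Nat) (items : List (String × List String)) (alvo d : String)
    (succ : List String) (rest : List (String × List String)) (vis res : List String)
    (hc : succ.contains alvo = false) :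
    pvAgo fuel items alvo ((d, succ) :: rest) vis res = pvAgo fuel items alvo rest vis res := by
  conv_lhs => rw [pvAgo.eq_def]
  simp only [hc, Bool.false_eq_true, if_false]

theorem pvAgo_cons_mem (fuel : Nat) (items : List (String × List String)) (alvo d : String)
    (succ : List String) (rest : List (String × List String)) (vis res : List String)
    (hc : succ.contains alvo = true) (hv : vis.contains d = true) :
    pvAgo fuel items alvo ((d, succ) :: rest) vis res
      = pvAgo fuel items alvo rest vis (PySem.Set.add res d) := by
  conv_lhs => rw [pvAgo.eq_def]
  simp only [hc, hv, if_true]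

theorem pvAgo_cons_notmem_zero (items : List (String × List String)) (alvo d : String)
    (succ : List String) (rest : List (String × List String)) (vis res : List String)
    (hc : succ.contains alvo = true) (hv : vis.contains d = false) :
    pvAgo 0 items alvo ((d, succ) :: rest) vis res
      = pvAgo 0 items alvo rest (PySem.Set.add vis d) (PySem.Set.add res d) := by
  conv_lhs => rw [pvAgo.eq_def]
  simp only [hc, hv, if_true, Bool.false_eq_true, if_false]

theorem pvAgo_cons_notmem_succ (fuel' : Nat) (items : List (String × List String)) (alvo d : String)
    (succ : List String) (rest : List (String × List String)) (vis res : List String)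
    (hc : succ.contains alvo = true) (hv : vis.contains d = false) :
    pvAgo (fuel' + 1) items alvo ((d, succ) :: rest) vis res
      = pvAgo (fuel' + 1) items alvo rest
          (pvAgo fuel' items d items (PySem.Set.add vis d) []).2
          (PySem.Set.update (PySem.Set.add res d)
            (pvAgo fuel' items d items (PySem.Set.add vis d) []).1) := by
  conv_lhs => rw [pvAgo.eq_def]
  simp only [hc, hv, if_true, Bool.false_eq_true, if_false]

theorem pvFilterMapPairs (c d : String) (succ : List String) :
    (((succ.map (fun s => (s, d))).filter (fun q => q.1 == c)).map (fun q => q.2))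
      = List.replicate (succ.count c) d := by
  induction succ with
  | nil => simp
  | cons s t ih =>
    by_cases h : s = c
    · subst h
      simp only [List.map_cons, List.filter_cons, BEq.rfl, if_true, List.count_cons_self, ih,
        List.replicate_succ]
    · have hb : ((s, d).1 == c) = false := by simpa using h
      simp only [List.map_cons, List.filter_cons, hb, Bool.false_eq_true, if_false, ih,
        List.count_cons]
      simp

theorem pvFlatPairs (c : String) (items : List (String × List String)) :
    (((items.flatMap (fun p => p.2.map (fun s => (s, p.1)))).filter (fun q => q.1 == c)).map
        (fun q => q.2))
      = pvFlat c items := by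
  induction items with
  | nil => simp [pvFlat]
  | cons p t ih =>
    simp only [List.flatMap_cons, List.filter_append, List.map_append, ih, pvFlat,
      List.flatMap_cons]
    rw [pvFilterMapPairs]

theorem pvGetD_buildPreds (items : List (String × List String)) (c : String) :
    (pvBuildPreds items).getD c [] = pvFlat c items := by
  have h1 : pvBuildPreds items
      = ((items.flatMap (fun p => p.2.map (fun s => (s, p.1)))).foldl
          (fun dd q => dd.modify q.1 [] (· ++ [q.2])) PySem.Dict.empty) := by
    rw [List.foldl_flatMap]
    unfold pvBuildPreds
    congr 1
    funext dd p
    rw [List.foldl_map]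
  rw [h1, PySem.Dict.getD_foldl_modify_append, PySem.Dict.getD_empty, List.nil_append]
  exact pvFlatPairs c items

-- Set.update eats a block of copies of an element already present
theorem pvUpdate_skip (n : Nat) (X E : List String) (d : String) (hd : d ∈ X) :
    PySem.Set.update X (List.replicate n d ++ E) = PySem.Set.update X E := by
  induction n with
  | zero => simp
  | succ m ih =>
    rw [List.replicate_succ, List.cons_append, PySem.Set.update_cons, PySem.Set.add_of_mem hd]
    exact ih

-- updating by a deduplicated list is updating by the list itself
theorem pvUpdate_ofList (s l : List String) :
    PySem.Set.update s (PySem.Set.ofList l) = PySem.Set.update s l := by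
  induction l using List.reverseRecOn with
  | nil => simp
  | append_singleton t x ih =>
    rw [PySem.Set.ofList_append_singleton, PySem.Set.add_eq_ite]
    by_cases hx : x ∈ PySem.Set.ofList t
    · have hx' : x ∈ t := (PySem.Set.mem_ofList _ _).1 hx
      rw [if_pos hx, ih, PySem.Set.update_append, PySem.Set.update_cons, PySem.Set.update_nil,
        PySem.Set.add_of_mem (by rw [PySem.Set.mem_update]; exact Or.inr hx')]
    · rw [if_neg hx, PySem.Set.update_append, PySem.Set.update_append, ih]

-- the trail loop only ever grows `visitados`
theorem pvEmit_vis_mono (fuel : Nat) (preds : PySem.Dict String (List String))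
    (pending vis : List String) (x : String) (hx : x ∈ vis) :
    x ∈ (pvEmit fuel preds pending vis).2 := by
  match pending with
  | [] => simpa [pvEmit]
  | d :: rest =>
    cases hv : vis.contains d with
    | true =>
      rw [pvEmit_cons_mem fuel preds d rest vis hv]
      exact pvEmit_vis_mono fuel preds rest vis x hx
    | false =>
      have hx' : x ∈ PySem.Set.add vis d := by rw [PySem.Set.mem_add]; exact Or.inl hx
      match fuel with
      | 0 =>
        rw [pvEmit_cons_notmem_zero preds d rest vis hv]
        exact pvEmit_vis_mono 0 preds rest _ x hx'
      | fuel' + 1 =>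
        rw [pvEmit_cons_notmem_succ fuel' preds d rest vis hv]
        exact pvEmit_vis_mono (fuel' + 1) preds rest _ x
          (pvEmit_vis_mono fuel' preds _ _ x hx')
termination_by (fuel, pending.length)

-- a block of copies of an already-visited element is emitted verbatim, changing nothing
theorem pvEmit_skip (n fuel : Nat) (preds : PySem.Dict String (List String)) (d : String)
    (rest vis : List String) (hv : d ∈ vis) :
    pvEmit fuel preds (List.replicate n d ++ rest) vis
      = (List.replicate n d ++ (pvEmit fuel preds rest vis).1,
         (pvEmit fuel preds rest vis).2) := by
  induction n with
  | zero => simp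
  | succ m ih =>
    rw [List.replicate_succ, List.cons_append,
      pvEmit_cons_mem fuel preds d _ vis (by simpa using hv), ih]
    simp

-- MAIN INVARIANT: A's loop is "dedup-update res by B's trail", with the same final visitados
theorem pvMain (fuel : Nat) (items : List (String × List String)) (alvo : String)
    (pending : List (String × List String)) (vis res : List String) :
    pvAgo fuel items alvo pending vis res
      = (PySem.Set.update res
           (pvEmit fuel (pvBuildPreds items) (pvFlat alvo pending) vis).1,
         (pvEmit fuel (pvBuildPreds items) (pvFlat alvo pending) vis).2) := by
  match pending with
  | [] => simp [pvAgo, pvEmit, pvFlat]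
  | (d, succ) :: rest =>
    have hflat : pvFlat alvo ((d, succ) :: rest)
        = List.replicate (succ.count alvo) d ++ pvFlat alvo rest := by
      simp [pvFlat]
    by_cases hc : succ.contains alvo = true
    · have hmem : alvo ∈ succ := by simpa using hc
      obtain ⟨n, hn⟩ : ∃ n, succ.count alvo = n + 1 := by
        have := List.count_pos_iff.mpr hmem
        exact ⟨succ.count alvo - 1, by omega⟩
      rw [hflat, hn, List.replicate_succ, List.cons_append]
      cases hv : vis.contains d with
      | true =>
        rw [pvAgo_cons_mem fuel items alvo d succ rest vis res hc hv,
          pvEmit_cons_mem fuel (pvBuildPreds items) d _ vis hv,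
          pvEmit_skip n fuel (pvBuildPreds items) d _ vis (by simpa using hv),
          pvMain fuel items alvo rest vis (PySem.Set.add res d)]
        rw [PySem.Set.update_cons,
          pvUpdate_skip n _ _ d (by rw [PySem.Set.mem_add]; exact Or.inr rfl)]
      | false =>
        match fuel with
        | 0 =>
          rw [pvAgo_cons_notmem_zero items alvo d succ rest vis res hc hv,
            pvEmit_cons_notmem_zero (pvBuildPreds items) d _ vis hv,
            pvEmit_skip n 0 (pvBuildPreds items) d _ (PySem.Set.add vis d)
              (by rw [PySem.Set.mem_add]; exact Or.inr rfl),
            pvMain 0 items alvo rest (PySem.Set.add vis d) (PySem.Set.add res d)]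
          rw [PySem.Set.update_cons,
            pvUpdate_skip n _ _ d (by rw [PySem.Set.mem_add]; exact Or.inr rfl)]
        | fuel' + 1 =>
          rw [pvAgo_cons_notmem_succ fuel' items alvo d succ rest vis res hc hv,
            pvEmit_cons_notmem_succ fuel' (pvBuildPreds items) d _ vis hv,
            pvGetD_buildPreds items d]
          have hrec : pvAgo fuel' items d items (PySem.Set.add vis d) []
              = (PySem.Set.update []
                   (pvEmit fuel' (pvBuildPreds items) (pvFlat d items) (PySem.Set.add vis d)).1,
                 (pvEmit fuel' (pvBuildPreds items) (pvFlat d items) (PySem.Set.add vis d)).2) :=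
            pvMain fuel' items d items (PySem.Set.add vis d) []
          set c := pvEmit fuel' (pvBuildPreds items) (pvFlat d items) (PySem.Set.add vis d) with hcdef
          have hdc : d ∈ c.2 :=
            pvEmit_vis_mono fuel' (pvBuildPreds items) (pvFlat d items)
              (PySem.Set.add vis d) d (by rw [PySem.Set.mem_add]; exact Or.inr rfl)
          rw [pvEmit_skip n (fuel' + 1) (pvBuildPreds items) d _ c.2 hdc, hrec,
            pvMain (fuel' + 1) items alvo rest c.2
              (PySem.Set.update (PySem.Set.add res d) (PySem.Set.update [] c.1))]
          have h0 : PySem.Set.update ([] : List String) c.1 = PySem.Set.ofList c.1 := by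
            rw [PySem.Set.ofList_eq_foldl]; rfl
          dsimp only
          congr 1
          rw [h0, pvUpdate_ofList, PySem.Set.update_cons, PySem.Set.update_append,
            pvUpdate_skip n _ _ d
              (by rw [PySem.Set.mem_update]; left; rw [PySem.Set.mem_add]; exact Or.inr rfl)]
    · have hc' : succ.contains alvo = false := by simpa using hc
      have hcnt : succ.count alvo = 0 := by
        rw [List.count_eq_zero]; simpa using hc'
      rw [hflat, hcnt, List.replicate_zero, List.nil_append,
        pvAgo_cons_skip fuel items alvo d succ rest vis res hc']
      exact pvMain fuel items alvo rest vis res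
termination_by (fuel, pending.length)

-- ===== VERDICT (by name: the statement is the Claim_ definition above) =====
theorem buscar_todos_pre_requisitos_spec : Claim_equal_buscar_todos_pre_requisitos := by
  intro materia_alvo grafo visitados _
  unfold Spec_buscar_todos_pre_requisitos
  unfold buscar_todos_pre_requisitos buscar_todos_pre_requisitos_alt
  simp only []
  rw [pvMain, pvGetD_buildPreds, PySem.Set.ofList_eq_foldl]
  rfl
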